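-- pv_equiv track=rewrite | github.com/morozowdmitry/mental_neighbours | morpheme_evaluation/pseudocognate.py | cut_possible_suffixes
-- ===== SOURCE A (Python) =====
-- def cut_possible_suffixes(word, suffixes):
--     pseudoroots = {word}
--
--     can_cut = True
--     while can_cut:
--         new_pseudoroots = set()
--         for suffix in suffixes:
--             for option in pseudoroots:
--                 pseudoroot = option.split('/')[0]
--                 existing_suffixes = option.split('/')[1:]
--                 if pseudoroot.endswith(suffix) and suffix not in existing_suffixes:
--                     new_pseudoroots.add('/'.join([pseudoroot[:-len(suffix)]] + [suffix] + existing_suffixes))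
--         if new_pseudoroots.issubset(pseudoroots):
--             can_cut = False
--         pseudoroots.update(new_pseudoroots)
--     pseudoroots = {x.split('/')[0] for x in pseudoroots}
--     return pseudoroots
-- ===== SOURCE B (Python) =====
-- def cut_possible_suffixes(word, suffixes):
--     # Frontier BFS over parsed states (root, used-suffixes tuple): the input word
--     # (itself in A's 'root/suf1/suf2' encoding) is parsed once, and each state is
--     # generated and processed once, instead of re-splitting every state every round.
--     parts = word.split('/')
--     start = (parts[0], tuple(parts[1:]))
--     seen = {start}
--     frontier = [start]
--     while frontier:
--         new_states = []
--         for suffix in suffixes: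
--             for root, used in frontier:
--                 if root.endswith(suffix) and suffix not in used:
--                     state = (root[:-len(suffix)], (suffix,) + used)
--                     if state not in seen:
--                         seen.add(state)
--                         new_states.append(state)
--         frontier = new_states
--     return {root for root, _ in seen}
-- ===== Notes on version B (the rewrite author's own statement) =====
-- stated objective: faster
-- what changed: A re-splits every string-encoded state ('root/suf1/suf2') on every pass over the whole growing set until a fixpoint; B parses the word once and does a frontier BFS over parsed (root, used-suffixes) states, so each state is processed once per suffix instead of once per round. Intended as faster; a timing run measured 62.9x at n=256, the largest size both complete (at n=1024 the reachable state set itself explodes and both time out).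
import Mathlib
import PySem

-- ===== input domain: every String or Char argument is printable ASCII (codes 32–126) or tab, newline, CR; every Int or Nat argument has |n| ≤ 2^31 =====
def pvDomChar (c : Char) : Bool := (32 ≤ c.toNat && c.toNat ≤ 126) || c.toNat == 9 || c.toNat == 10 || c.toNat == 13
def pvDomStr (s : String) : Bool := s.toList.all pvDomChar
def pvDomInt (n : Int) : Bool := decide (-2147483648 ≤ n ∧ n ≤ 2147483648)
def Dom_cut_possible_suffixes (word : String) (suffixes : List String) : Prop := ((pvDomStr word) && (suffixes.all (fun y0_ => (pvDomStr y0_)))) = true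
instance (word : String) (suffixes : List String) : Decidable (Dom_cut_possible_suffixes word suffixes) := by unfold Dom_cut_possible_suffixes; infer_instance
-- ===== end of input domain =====

-- B replaces A's repeated re-splitting of every string-encoded state on every round by a
-- frontier BFS over parsed (root, used-suffixes) states, each processed once per suffix
-- (intended as faster; a timing run measured 62.9x at the largest size both complete).

-- ===== PORT A =====
-- one iteration of A's while-loop body: builds new_pseudoroots from the current set
def pvARound (suffixes : List String) (ps : PySem.Set String) : PySem.Set String :=
  suffixes.foldl (fun np suffix =>
    ps.foldl (fun np option =>
      -- option.split('/') : sep "/" is non-empty, so split? never returns none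
      let parts := (PySem.Str.split? option "/").getD []
      let pseudoroot := parts.headD ""       -- parts[0]; split always yields ≥ 1 piece
      let existing := parts.tail             -- parts[1:]
      if PySem.Str.endswith pseudoroot suffix && !(existing.contains suffix) then
        PySem.Set.add np
          (PySem.Str.join "/" (PySem.Str.slice pseudoroot none (some (-(PySem.Str.len suffix : Int))) :: suffix :: existing))
      else np) np) PySem.Set.empty

-- A's while-loop; fuel only makes it total: each used-suffix list is duplicate-free, so the
-- loop stops after at most suffixes.length + 1 iterations and the fuel is never exhausted.
def pvALoop (suffixes : List String) : Nat → PySem.Set String → PySem.Set String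
  | 0, ps => ps
  | fuel+1, ps =>
    let np := pvARound suffixes ps
    let canCut := !(PySem.Set.issubset np ps)
    let ps' := PySem.Set.update ps np
    if canCut then pvALoop suffixes fuel ps' else ps'

def cut_possible_suffixes (word : String) (suffixes : List String) : List String :=
  let ps := pvALoop suffixes (suffixes.length + 2) (PySem.Set.ofList [word])
  PySem.Set.ofList (ps.map (fun x => ((PySem.Str.split? x "/").getD []).headD ""))

-- ===== PORT B =====
-- one round of B's BFS: scan only the frontier, collecting the genuinely new states
def pvBRound (suffixes : List String) (seen : PySem.Set (String × List String))
    (frontier : List (String × List String)) :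
    PySem.Set (String × List String) × List (String × List String) :=
  suffixes.foldl (fun acc suffix =>
    frontier.foldl (fun acc st =>
      if PySem.Str.endswith st.1 suffix && !(st.2.contains suffix) then
        let c := (PySem.Str.slice st.1 none (some (-(PySem.Str.len suffix : Int))), suffix :: st.2)
        if PySem.Set.contains acc.1 c then acc
        else (PySem.Set.add acc.1 c, acc.2 ++ [c])
      else acc) acc) (seen, [])

-- B's while-loop; same fuel bound as A's, likewise never exhausted.
def pvBLoop (suffixes : List String) : Nat → PySem.Set (String × List String) →
    List (String × List String) → PySem.Set (String × List String)
  | 0, seen, _ => seen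
  | fuel+1, seen, frontier =>
    if frontier.isEmpty then seen
    else
      let r := pvBRound suffixes seen frontier
      pvBLoop suffixes fuel r.1 r.2

def cut_possible_suffixes_alt (word : String) (suffixes : List String) : List String :=
  -- word.split('/') : sep "/" is non-empty, so split? never returns none
  let parts := (PySem.Str.split? word "/").getD []
  let start : String × List String := (parts.headD "", parts.tail)
  let seen := pvBLoop suffixes (suffixes.length + 2) (PySem.Set.ofList [start]) [start]
  PySem.Set.ofList (seen.map (fun st => st.1))

-- ===== PRECONDITION & SPEC =====
def Spec_cut_possible_suffixes (word : String) (suffixes : List String) (out : List String) : Prop := out = cut_possible_suffixes_alt word suffixes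
instance (word : String) (suffixes : List String) (out : List String) : Decidable (Spec_cut_possible_suffixes word suffixes out) := by unfold Spec_cut_possible_suffixes; infer_instance

-- ===== CLAIM (what is proved, stated in full; the proofs are below) =====
def Claim_equal_cut_possible_suffixes : Prop := ∀ (word : String) (suffixes : List String), Dom_cut_possible_suffixes word suffixes → Spec_cut_possible_suffixes word suffixes (cut_possible_suffixes word suffixes)

-- ===== LEMMAS AND PROOFS =====

def pvTail (ps : List (List Char)) : List Char :=
  if ps = [] then [] else '/' :: PySem.Chars.join ['/'] ps
lemma pvJoin_eq (q : List Char) (ps : List (List Char)) :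
    PySem.Chars.join ['/'] (q :: ps) = q ++ pvTail ps := by
  cases ps with
  | nil => simp [pvTail, PySem.Chars.join_singleton]
  | cons r rs => simp [pvTail, PySem.Chars.join_cons_cons]

def pvSplit : List Char → List (List Char)
  | [] => [[]]
  | c :: rest => if c = '/' then [] :: pvSplit rest
                 else (c :: (pvSplit rest).headD []) :: (pvSplit rest).tail

lemma pvSplit_ne_nil (l : List Char) : pvSplit l ≠ [] := by
  cases l with
  | nil => simp [pvSplit]
  | cons c rest => by_cases h : c = '/' <;> simp [pvSplit, h]

lemma pv_go_split : ∀ (fuel : Nat) (l cur : List Char) (acc : List (List Char)),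
    l.length < fuel →
    PySem.Chars.splitOn.go ['/'] fuel l cur acc
      = acc.reverse ++ ((cur.reverse ++ (pvSplit l).headD []) :: (pvSplit l).tail) := by
  intro fuel
  induction fuel with
  | zero => intro l cur acc h; omega
  | succ fuel ih =>
    intro l cur acc h
    cases l with
    | nil => simp [PySem.Chars.splitOn.go, pvSplit]
    | cons c rest =>
      by_cases hc : c = '/'
      · subst hc
        have hstep : PySem.Chars.splitOn.go ['/'] (fuel+1) ('/' :: rest) cur acc
            = PySem.Chars.splitOn.go ['/'] fuel rest [] (cur.reverse :: acc) := by
          simp [PySem.Chars.splitOn.go, List.isPrefixOf]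
        rw [hstep, ih rest [] (cur.reverse :: acc) (by simpa using h)]
        simp only [pvSplit]
        cases hps : pvSplit rest with
        | nil => exact absurd hps (pvSplit_ne_nil rest)
        | cons q ps' => simp
      · have hstep : PySem.Chars.splitOn.go ['/'] (fuel+1) (c :: rest) cur acc
            = PySem.Chars.splitOn.go ['/'] fuel rest (c :: cur) acc := by
          simp [PySem.Chars.splitOn.go, List.isPrefixOf]
          intro e; exact absurd e.symm hc
        rw [hstep, ih rest (c :: cur) acc (by simpa using h)]
        simp [pvSplit, hc]
lemma pv_splitOn_eq (l : List Char) : PySem.Chars.splitOn l ['/'] = pvSplit l := by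
  rw [PySem.Chars.splitOn, pv_go_split (l.length + 1) l [] [] (by omega)]
  cases hps : pvSplit l with
  | nil => exact absurd hps (pvSplit_ne_nil l)
  | cons q ps' => simp

lemma pvSplit_clean (l : List Char) : ∀ q ∈ pvSplit l, '/' ∉ q := by
  induction l with
  | nil => simp [pvSplit]
  | cons c rest ih =>
    intro q hq
    by_cases hc : c = '/'
    · rw [pvSplit, if_pos hc] at hq
      rcases hq with _ | hq
      · simp
      · exact ih q (by assumption)
    · rw [pvSplit, if_neg hc] at hq
      cases hps : pvSplit rest with
      | nil => exact absurd hps (pvSplit_ne_nil rest)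
      | cons p ps' =>
        rw [hps] at hq
        simp only [List.headD_cons, List.tail_cons] at hq
        rcases hq with _ | hq
        · intro hm
          rcases hm with _ | hm
          · exact hc rfl
          · exact ih p (by simp [hps]) (by assumption)
        · exact ih q (by simp [hps]; right; assumption)

lemma pv_join_split (l : List Char) : PySem.Chars.join ['/'] (pvSplit l) = l := by
  induction l with
  | nil => simp [pvSplit, PySem.Chars.join_singleton]
  | cons c rest ih =>
    by_cases hc : c = '/'
    · subst hc
      rw [pvSplit, if_pos rfl]
      cases hps : pvSplit rest with
      | nil => exact absurd hps (pvSplit_ne_nil rest)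
      | cons q ps' =>
        rw [PySem.Chars.join_cons_cons, ← hps, ih]
        rfl
    · rw [pvSplit, if_neg hc]
      cases hps : pvSplit rest with
      | nil => exact absurd hps (pvSplit_ne_nil rest)
      | cons q ps' =>
        simp only [List.headD_cons, List.tail_cons]
        rw [pvJoin_eq, List.cons_append, ← pvJoin_eq, ← hps, ih]

lemma pv_go_join : ∀ (fuel : Nat) (p : List Char) (ps : List (List Char)) (cur : List Char)
    (acc : List (List Char)), '/' ∉ p → (∀ q ∈ ps, '/' ∉ q) →
    (p ++ pvTail ps).length < fuel →
    PySem.Chars.splitOn.go ['/'] fuel (p ++ pvTail ps) cur acc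
      = acc.reverse ++ ((cur.reverse ++ p) :: ps) := by
  intro fuel
  induction fuel with
  | zero => intro p ps cur acc _ _ h; omega
  | succ fuel ih =>
    intro p ps cur acc hp hps h
    cases p with
    | cons c p' =>
      have hc : c ≠ '/' := by intro e; exact hp (by simp [e])
      have : PySem.Chars.splitOn.go ['/'] (fuel+1) (c :: (p' ++ pvTail ps)) cur acc
          = PySem.Chars.splitOn.go ['/'] fuel (p' ++ pvTail ps) (c :: cur) acc := by
        simp [PySem.Chars.splitOn.go, List.isPrefixOf]
        intro e; exact absurd e.symm hc
      rw [List.cons_append, this, ih p' ps (c :: cur) acc (by intro m; exact hp (by simp [m]))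
        hps (by simpa using Nat.lt_of_succ_lt_succ (by simpa using h))]
      simp
    | nil =>
      cases ps with
      | nil =>
        simp [pvTail, PySem.Chars.splitOn.go]
      | cons q ps' =>
        have hstep : PySem.Chars.splitOn.go ['/'] (fuel+1) ('/' :: PySem.Chars.join ['/'] (q :: ps')) cur acc
            = PySem.Chars.splitOn.go ['/'] fuel (PySem.Chars.join ['/'] (q :: ps')) [] (cur.reverse :: acc) := by
          simp [PySem.Chars.splitOn.go, List.isPrefixOf]
        have hq : '/' ∉ q := hps q (by simp)
        have hps' : ∀ r ∈ ps', '/' ∉ r := fun r hr => hps r (by simp [hr])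
        have hlen : (q ++ pvTail ps').length < fuel := by
          have := h
          simp [pvTail, pvJoin_eq q ps'] at this ⊢
          omega
        simp only [pvTail, if_neg (by simp : ¬(q :: ps' = [])), List.nil_append]
        rw [hstep, pvJoin_eq q ps', ih q ps' [] (cur.reverse :: acc) hq hps' hlen]
        simp

lemma pv_splitOn_join (p : List Char) (ps : List (List Char))
    (hp : '/' ∉ p) (hps : ∀ q ∈ ps, '/' ∉ q) :
    PySem.Chars.splitOn (PySem.Chars.join ['/'] (p :: ps)) ['/'] = p :: ps := by
  rw [PySem.Chars.splitOn, pvJoin_eq]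
  rw [pv_go_join _ p ps [] [] hp hps (by omega)]
  simp

def PvClean (st : String × List String) : Prop :=
  '/' ∉ st.1.toList ∧ ∀ u ∈ st.2, '/' ∉ u.toList

def pvEncode (st : String × List String) : String := PySem.Str.join "/" (st.1 :: st.2)

lemma pv_decode (st : String × List String) (h : PvClean st) :
    (PySem.Str.split? (pvEncode st) "/").getD [] = st.1 :: st.2 := by
  have hsep : ("/" : String).toList = ['/'] := rfl
  rw [PySem.Str.split?, PySem.Chars.split?]
  simp only [pvEncode, PySem.Str.toList_join, hsep, List.map_cons]
  rw [if_neg (by simp)]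
  rw [pv_splitOn_join st.1.toList (st.2.map String.toList) h.1
    (by intro q hq; simp at hq; obtain ⟨u, hu, rfl⟩ := hq; exact h.2 u hu)]
  simp [String.ofList_toList, List.map_map, Function.comp_def]

lemma pv_encode_inj (a b : String × List String) (ha : PvClean a) (hb : PvClean b)
    (h : pvEncode a = pvEncode b) : a = b := by
  have h1 := pv_decode a ha
  have h2 := pv_decode b hb
  rw [h, h2] at h1
  cases a; cases b; simp_all


def pvCond (st : String × List String) (s : String) : Bool :=
  PySem.Str.endswith st.1 s && !(st.2.contains s)

def pvNext (st : String × List String) (s : String) : String × List String :=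
  (PySem.Str.slice st.1 none (some (-(PySem.Str.len s : Int))), s :: st.2)

lemma pv_clean_next (st : String × List String) (s : String) (h : PvClean st)
    (hc : pvCond st s = true) : PvClean (pvNext st s) := by
  have hs : s.toList <:+ st.1.toList := by
    rw [pvCond, Bool.and_eq_true] at hc
    have := hc.1
    rw [PySem.Str.endswith_eq] at this
    exact (PySem.Chars.endswith_iff _ _).1 this
  constructor
  · intro hm
    simp only [pvNext, PySem.Str.toList_slice, PySem.Chars.slice_eq_listSlice] at hm
    exact h.1 (PySem.List.mem_of_mem_slice _ _ _ hm)
  · intro u hu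
    rcases hu with _ | hu
    · exact fun hm => h.1 (hs.subset hm)
    · exact h.2 u (by assumption)

def pvAStep (s : String) (np : PySem.Set String) (o : String) : PySem.Set String :=
  if PySem.Str.endswith (((PySem.Str.split? o "/").getD []).headD "") s
      && !((((PySem.Str.split? o "/").getD []).tail).contains s) then
    PySem.Set.add np
      (PySem.Str.join "/" (PySem.Str.slice (((PySem.Str.split? o "/").getD []).headD "") none
        (some (-(PySem.Str.len s : Int))) :: s :: (((PySem.Str.split? o "/").getD []).tail)))
  else np

lemma pvAStep_encode (s : String) (np : PySem.Set String) (st : String × List String)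
    (h : PvClean st) :
    pvAStep s np (pvEncode st)
      = if pvCond st s then PySem.Set.add np (pvEncode (pvNext st s)) else np := by
  rw [pvAStep, pv_decode st h]
  rfl

lemma pv_update_append {α : Type} [BEq α] (s t : PySem.Set α) (x : α) :
    PySem.Set.update s (t ++ [x]) = PySem.Set.add (PySem.Set.update s t) x := by
  simp [PySem.Set.update, List.foldl_append]

lemma pv_mem_update_left {α : Type} [BEq α] [LawfulBEq α] (s : PySem.Set α) (t : List α) (x : α)
    (h : x ∈ s) : x ∈ PySem.Set.update s t := (PySem.Set.mem_update s t x).2 (Or.inl h)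

lemma pv_update_eq_self_of_subset {α : Type} [BEq α] [LawfulBEq α] (s : PySem.Set α)
    (t : List α) (h : ∀ x ∈ t, x ∈ s) : PySem.Set.update s t = s := by
  induction t generalizing s with
  | nil => rfl
  | cons y t ih =>
    have hy : y ∈ s := h y (by simp)
    have : PySem.Set.add s y = s := by
      unfold PySem.Set.add
      rw [if_pos ((PySem.Set.contains_iff s y).2 hy)]
    simp only [PySem.Set.update, List.foldl_cons]
    rw [show List.foldl PySem.Set.add (PySem.Set.add s y) t = PySem.Set.update (PySem.Set.add s y) t from rfl,
      this, ih s (fun x hx => h x (by simp [hx]))]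

lemma pv_update_add_of_mem {α : Type} [BEq α] [LawfulBEq α] (s t : PySem.Set α)
    (x : α) (h : x ∈ s ∨ x ∈ t) :
    PySem.Set.update s (PySem.Set.add t x) = PySem.Set.update s t := by
  by_cases hx : x ∈ t
  · unfold PySem.Set.add
    rw [if_pos ((PySem.Set.contains_iff t x).2 hx)]
  · have hxs : x ∈ s := h.resolve_right hx
    rw [show PySem.Set.add t x = t ++ [x] from by
      simp [PySem.Set.add, hx]]
    rw [pv_update_append]
    simp [PySem.Set.add, pv_mem_update_left s t x hxs]

lemma pv_update_add_of_not_mem {α : Type} [BEq α] [LawfulBEq α] (s t : PySem.Set α) (x : α)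
    (h : x ∉ PySem.Set.update s t) :
    PySem.Set.update s (PySem.Set.add t x) = PySem.Set.update s t ++ [x] := by
  have hxt : x ∉ t := fun hm => h ((PySem.Set.mem_update s t x).2 (Or.inr hm))
  rw [show PySem.Set.add t x = t ++ [x] from by
    simp [PySem.Set.add, hxt]]
  rw [pv_update_append]
  simp [PySem.Set.add, h]

def pvBStep (s : String) (acc : PySem.Set (String × List String) × List (String × List String))
    (st : String × List String) : PySem.Set (String × List String) × List (String × List String) :=
  if PySem.Str.endswith st.1 s && !(st.2.contains s) then
    let c := (PySem.Str.slice st.1 none (some (-(PySem.Str.len s : Int))), s :: st.2)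
    if PySem.Set.contains acc.1 c then acc else (PySem.Set.add acc.1 c, acc.2 ++ [c])
  else acc

def PvRel (base : List (String × List String)) (np : PySem.Set String)
    (acc : PySem.Set (String × List String) × List (String × List String)) : Prop :=
  acc.1 = base ++ acc.2
  ∧ PySem.Set.update (base.map pvEncode) np = acc.1.map pvEncode
  ∧ ∀ st ∈ acc.2, PvClean st

lemma pv_Aidle (s : String) (base : List (String × List String)) :
    ∀ (olds : List (String × List String)) (np : PySem.Set String)
      (acc : PySem.Set (String × List String) × List (String × List String)),
      (∀ st ∈ olds, PvClean st ∧ (pvCond st s = true → pvNext st s ∈ base)) →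
      PvRel base np acc →
      PvRel base (olds.foldl (fun np st => pvAStep s np (pvEncode st)) np) acc := by
  intro olds
  induction olds with
  | nil => intro np acc _ hrel; exact hrel
  | cons st olds ih =>
    intro np acc holds hrel
    simp only [List.foldl_cons]
    apply ih _ _ (fun st' h' => holds st' (by simp [h']))
    rw [pvAStep_encode s np st (holds st (by simp)).1]
    by_cases hc : pvCond st s = true
    · rw [if_pos hc]
      have hnext : pvNext st s ∈ base := (holds st (by simp)).2 hc
      have hmem : pvEncode (pvNext st s) ∈ base.map pvEncode := List.mem_map_of_mem hnext
      exact ⟨hrel.1, by rw [pv_update_add_of_mem _ _ _ (Or.inl hmem)]; exact hrel.2.1, hrel.2.2⟩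
    · rw [if_neg hc]; exact hrel

lemma pv_lockstep (s : String) (base : List (String × List String))
    (hbase : ∀ st ∈ base, PvClean st) :
    ∀ (rest : List (String × List String)) (np : PySem.Set String)
      (acc : PySem.Set (String × List String) × List (String × List String)),
      (∀ st ∈ rest, st ∈ base) → PvRel base np acc →
      PvRel base (rest.foldl (fun np st => pvAStep s np (pvEncode st)) np)
        (rest.foldl (pvBStep s) acc)
      ∧ acc.1 <+: (rest.foldl (pvBStep s) acc).1
      ∧ ∀ st ∈ rest, pvCond st s = true → pvNext st s ∈ (rest.foldl (pvBStep s) acc).1 := by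
  intro rest
  induction rest with
  | nil => intro np acc _ hrel; exact ⟨hrel, List.prefix_refl _, by simp⟩
  | cons st rest ih =>
    intro np acc hsub hrel
    have hstb : st ∈ base := hsub st (by simp)
    have hstc : PvClean st := hbase st hstb
    have hcleanall : ∀ x ∈ acc.1, PvClean x := by
      intro x hx
      rw [hrel.1] at hx
      rcases List.mem_append.1 hx with h | h
      · exact hbase x h
      · exact hrel.2.2 x h
    simp only [List.foldl_cons]
    rw [pvAStep_encode s np st hstc]
    -- analyse one synchronised step
    have hstep : PvRel base (if pvCond st s then PySem.Set.add np (pvEncode (pvNext st s)) else np)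
        (pvBStep s acc st) ∧ acc.1 <+: (pvBStep s acc st).1
        ∧ (pvCond st s = true → pvNext st s ∈ (pvBStep s acc st).1) := by
      have hB : pvBStep s acc st = if pvCond st s then
          (if PySem.Set.contains acc.1 (pvNext st s) then acc
           else (PySem.Set.add acc.1 (pvNext st s), acc.2 ++ [pvNext st s])) else acc := rfl
      rw [hB]
      by_cases hc : pvCond st s = true
      · rw [if_pos hc, if_pos hc]
        have hcc : PvClean (pvNext st s) := pv_clean_next st s hstc hc
        by_cases hmem : pvNext st s ∈ acc.1
        · rw [if_pos ((PySem.Set.contains_iff _ _).2 hmem)]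
          refine ⟨⟨hrel.1, ?_, hrel.2.2⟩, List.prefix_refl _, fun _ => hmem⟩
          rw [pv_update_add_of_mem _ _ _ ((PySem.Set.mem_update _ np _).1
            (by rw [hrel.2.1]; exact List.mem_map_of_mem hmem))]
          exact hrel.2.1
        · rw [if_neg (fun hcon => hmem ((PySem.Set.contains_iff _ _).1 hcon))]
          have henc : pvEncode (pvNext st s) ∉ PySem.Set.update (base.map pvEncode) np := by
            rw [hrel.2.1]
            intro hin
            obtain ⟨x, hx, hex⟩ := List.mem_map.1 hin
            exact hmem (pv_encode_inj x _ (hcleanall x hx) hcc hex ▸ hx)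
          have hadd : PySem.Set.add acc.1 (pvNext st s) = acc.1 ++ [pvNext st s] := by
            unfold PySem.Set.add
            rw [if_neg (fun hcon => hmem ((PySem.Set.contains_iff _ _).1 hcon))]
          refine ⟨⟨?_, ?_, ?_⟩, ?_, fun _ => ?_⟩
          · show PySem.Set.add acc.1 _ = base ++ (acc.2 ++ [pvNext st s])
            rw [hadd, hrel.1, List.append_assoc]
          · show PySem.Set.update _ _ = (PySem.Set.add acc.1 _).map pvEncode
            rw [pv_update_add_of_not_mem _ _ _ henc, hadd, hrel.2.1]
            simp
          · intro x hx
            rcases List.mem_append.1 hx with h | h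
            · exact hrel.2.2 x h
            · simp at h; rw [h]; exact hcc
          · show acc.1 <+: PySem.Set.add acc.1 _
            rw [hadd]; exact List.prefix_append _ _
          · show pvNext st s ∈ PySem.Set.add acc.1 (pvNext st s)
            rw [hadd]; simp
      · rw [if_neg hc, if_neg hc]
        exact ⟨hrel, List.prefix_refl _, fun h => absurd h hc⟩
    obtain ⟨hrel', hpre', hcov'⟩ := ih _ (pvBStep s acc st) (fun x hx => hsub x (by simp [hx])) hstep.1
    refine ⟨hrel', hstep.2.1.trans hpre', ?_⟩
    intro x hx hcx
    rcases hx with _ | hx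
    · exact hpre'.subset (hstep.2.2 hcx)
    · exact hcov' x (by assumption) hcx

lemma pv_round (old frontier : List (String × List String))
    (hclean : ∀ st ∈ old ++ frontier, PvClean st) :
    ∀ (ss : List String),
      (∀ s ∈ ss, ∀ st ∈ old, pvCond st s = true → pvNext st s ∈ old ++ frontier) →
    ∀ (np : PySem.Set String) (acc : PySem.Set (String × List String) × List (String × List String)),
      PvRel (old ++ frontier) np acc →
      PvRel (old ++ frontier)
        (ss.foldl (fun np s => ((old ++ frontier).map pvEncode).foldl (pvAStep s) np) np)
        (ss.foldl (fun acc s => frontier.foldl (pvBStep s) acc) acc)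
      ∧ acc.1 <+: (ss.foldl (fun acc s => frontier.foldl (pvBStep s) acc) acc).1
      ∧ ∀ s ∈ ss, ∀ st ∈ frontier, pvCond st s = true →
          pvNext st s ∈ (ss.foldl (fun acc s => frontier.foldl (pvBStep s) acc) acc).1 := by
  intro ss
  induction ss with
  | nil => intro _ np acc hrel; exact ⟨hrel, List.prefix_refl _, by simp⟩
  | cons s ss ih =>
    intro hcov np acc hrel
    simp only [List.foldl_cons]
    -- A's fold over the whole set, split into the old part and the frontier part
    have hsplit : ((old ++ frontier).map pvEncode).foldl (pvAStep s) np
        = frontier.foldl (fun np st => pvAStep s np (pvEncode st))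
            (old.foldl (fun np st => pvAStep s np (pvEncode st)) np) := by
      rw [List.map_append, List.foldl_append, List.foldl_map, List.foldl_map]
    have h1 : PvRel (old ++ frontier) (old.foldl (fun np st => pvAStep s np (pvEncode st)) np) acc :=
      pv_Aidle s (old ++ frontier) old np acc
        (fun st h => ⟨hclean st (List.mem_append.2 (Or.inl h)), hcov s (by simp) st h⟩) hrel
    have h2 := pv_lockstep s (old ++ frontier) hclean frontier
      (old.foldl (fun np st => pvAStep s np (pvEncode st)) np)
      acc (fun st h => List.mem_append.2 (Or.inr h)) h1
    rw [hsplit]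
    obtain ⟨hrel2, hpre2, hcov2⟩ := h2
    obtain ⟨hrel3, hpre3, hcov3⟩ := ih (fun s' hs' => hcov s' (by simp [hs'])) _ _ hrel2
    refine ⟨hrel3, hpre2.trans hpre3, ?_⟩
    intro s' hs' st hst hc
    rcases hs' with _ | hs'
    · exact hpre3.subset (hcov2 st hst hc)
    · exact hcov3 s' (by assumption) st hst hc


lemma pv_bloop_nil (suffixes : List String) (f : Nat) (seen : PySem.Set (String × List String)) :
      pvBLoop suffixes f seen [] = seen := by
  cases f <;> simp [pvBLoop]

lemma pv_aRound_eq (suffixes : List String) (ps : PySem.Set String) :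
    pvARound suffixes ps = suffixes.foldl (fun np s => ps.foldl (pvAStep s) np) PySem.Set.empty := rfl

lemma pv_bRound_eq (suffixes : List String) (seen : PySem.Set (String × List String))
    (frontier : List (String × List String)) :
    pvBRound suffixes seen frontier
      = suffixes.foldl (fun acc s => frontier.foldl (pvBStep s) acc) (seen, []) := rfl

lemma pv_loop (suffixes : List String) :
    ∀ (f : Nat) (old frontier : List (String × List String)),
      (∀ st ∈ old ++ frontier, PvClean st) →
      (∀ s ∈ suffixes, ∀ st ∈ old, pvCond st s = true → pvNext st s ∈ old ++ frontier) →
      pvALoop suffixes f ((old ++ frontier).map pvEncode)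
          = (pvBLoop suffixes f (old ++ frontier) frontier).map pvEncode
      ∧ ∀ st ∈ pvBLoop suffixes f (old ++ frontier) frontier, PvClean st := by
  intro f
  induction f with
  | zero => intro old frontier hclean _; exact ⟨rfl, hclean⟩
  | succ f ih =>
    intro old frontier hclean hcov
    have hrel0 : PvRel (old ++ frontier) PySem.Set.empty (old ++ frontier, []) :=
      ⟨by simp, rfl, by simp⟩
    obtain ⟨hrel, hpre, hcovr⟩ := pv_round old frontier hclean suffixes hcov PySem.Set.empty _ hrel0
    rw [← pv_bRound_eq] at hrel hpre hcovr
    set r := pvBRound suffixes (old ++ frontier) frontier with hr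
    rw [← pv_aRound_eq] at hrel
    have hupd : PySem.Set.update ((old ++ frontier).map pvEncode)
        (pvARound suffixes ((old ++ frontier).map pvEncode)) = r.1.map pvEncode := hrel.2.1
    have hbase : r.1 = (old ++ frontier) ++ r.2 := hrel.1
    have hcleanall : ∀ st ∈ r.1, PvClean st := by
      intro x hx
      rw [hbase] at hx
      rcases List.mem_append.1 hx with h | h
      · exact hclean x h
      · exact hrel.2.2 x h
    have hA : pvALoop suffixes (f+1) ((old ++ frontier).map pvEncode)
        = if !(PySem.Set.issubset (pvARound suffixes ((old ++ frontier).map pvEncode))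
              ((old ++ frontier).map pvEncode)) then
            pvALoop suffixes f (PySem.Set.update ((old ++ frontier).map pvEncode)
              (pvARound suffixes ((old ++ frontier).map pvEncode)))
          else PySem.Set.update ((old ++ frontier).map pvEncode)
              (pvARound suffixes ((old ++ frontier).map pvEncode)) := rfl
    by_cases hE : r.2 = []
    · -- nothing new: A's subset test succeeds and both sides stop
      have hup : PySem.Set.update ((old ++ frontier).map pvEncode)
          (pvARound suffixes ((old ++ frontier).map pvEncode)) = (old ++ frontier).map pvEncode := by
        rw [hupd, hbase, hE, List.append_nil]
      have hsub : PySem.Set.issubset (pvARound suffixes ((old ++ frontier).map pvEncode))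
          ((old ++ frontier).map pvEncode) = true := by
        rw [PySem.Set.issubset_iff]
        intro x hx
        have : x ∈ PySem.Set.update ((old ++ frontier).map pvEncode)
            (pvARound suffixes ((old ++ frontier).map pvEncode)) :=
          (PySem.Set.mem_update _ _ _).2 (Or.inr hx)
        rwa [hup] at this
      rw [hA, hsub]
      simp only [Bool.not_true, Bool.false_eq_true, if_false, hup]
      have hB : pvBLoop suffixes (f+1) (old ++ frontier) frontier = old ++ frontier := by
        cases hfc : frontier with
        | nil => rw [pv_bloop_nil]
        | cons a l =>
          have hstep : pvBLoop suffixes (f+1) (old ++ (a :: l)) (a :: l)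
              = pvBLoop suffixes f (pvBRound suffixes (old ++ (a :: l)) (a :: l)).1
                  (pvBRound suffixes (old ++ (a :: l)) (a :: l)).2 := by
            simp only [pvBLoop, List.isEmpty_cons, Bool.false_eq_true, if_false]
          rw [hstep, ← hfc, ← hr, hE, pv_bloop_nil, hbase, hE, List.append_nil]
      rw [hB]
      exact ⟨rfl, hclean⟩
    · -- genuinely new states: A recurses and so does B
      have hfr : frontier ≠ [] := by
        intro hfrn
        apply hE
        have : r = (old ++ frontier, []) := by
          rw [hr, pv_bRound_eq, hfrn]
          have : ∀ (ss : List String) (acc : PySem.Set (String × List String) × List (String × List String)),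
              ss.foldl (fun acc s => List.foldl (pvBStep s) acc ([] : List (String × List String))) acc = acc := by
            intro ss; induction ss with
            | nil => intro acc; rfl
            | cons s ss ihs => intro acc; simp only [List.foldl_cons, List.foldl_nil]; exact ihs acc
          exact this suffixes _
        rw [this]
      have hsub : PySem.Set.issubset (pvARound suffixes ((old ++ frontier).map pvEncode))
          ((old ++ frontier).map pvEncode) = false := by
        by_contra hcon
        have hsub' : PySem.Set.issubset (pvARound suffixes ((old ++ frontier).map pvEncode))
            ((old ++ frontier).map pvEncode) = true := by
          cases h : PySem.Set.issubset (pvARound suffixes ((old ++ frontier).map pvEncode))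
            ((old ++ frontier).map pvEncode)
          · exact absurd h hcon
          · rfl
        have := pv_update_eq_self_of_subset ((old ++ frontier).map pvEncode)
          (pvARound suffixes ((old ++ frontier).map pvEncode))
          (PySem.Set.issubset_iff _ _ |>.1 hsub')
        rw [hupd, hbase] at this
        have hlen := congrArg List.length this
        simp only [List.map_append, List.length_append, List.length_map] at hlen
        exact hE (List.length_eq_zero_iff.1 (by omega))
      rw [hA, hsub]
      simp only [Bool.not_false, if_true, hupd, hbase]
      have hBstep : pvBLoop suffixes (f+1) (old ++ frontier) frontier
          = pvBLoop suffixes f r.1 r.2 := by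
        cases hfc : frontier with
        | nil => exact absurd hfc hfr
        | cons a l =>
          have hstep : pvBLoop suffixes (f+1) (old ++ (a :: l)) (a :: l)
              = pvBLoop suffixes f (pvBRound suffixes (old ++ (a :: l)) (a :: l)).1
                  (pvBRound suffixes (old ++ (a :: l)) (a :: l)).2 := by
            simp only [pvBLoop, List.isEmpty_cons, Bool.false_eq_true, if_false]
          rw [hstep, ← hfc, ← hr]
      rw [hBstep, hbase]
      have hcov' : ∀ s ∈ suffixes, ∀ st ∈ old ++ frontier, pvCond st s = true →
          pvNext st s ∈ (old ++ frontier) ++ r.2 := by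
        intro s hs st hst hc
        rcases List.mem_append.1 hst with h | h
        · exact List.mem_append.2 (Or.inl (hcov s hs st h hc))
        · rw [← hbase]; exact hcovr s hs st h hc
      have := ih (old ++ frontier) r.2 (by rw [← hbase]; exact hcleanall) hcov'
      exact this

lemma pv_final (word : String) (suffixes : List String) :
    cut_possible_suffixes word suffixes = cut_possible_suffixes_alt word suffixes := by
  have hparts : (PySem.Str.split? word "/").getD [] = (pvSplit word.toList).map String.ofList := by
    rw [PySem.Str.split?, show ("/" : String).toList = ['/'] from rfl, PySem.Chars.split?,
      if_neg (by simp), pv_splitOn_eq]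
    rfl
  cases hq : pvSplit word.toList with
  | nil => exact absurd hq (pvSplit_ne_nil _)
  | cons q qs =>
  have hst0 : ((PySem.Str.split? word "/").getD []).headD ""
      = String.ofList q := by rw [hparts, hq]; rfl
  have hst2 : ((PySem.Str.split? word "/").getD []).tail
      = qs.map String.ofList := by rw [hparts, hq]; rfl
  have hclean0 : PvClean (String.ofList q, qs.map String.ofList) := by
    constructor
    · rw [String.toList_ofList]
      exact pvSplit_clean word.toList q (by rw [hq]; simp)
    · intro u hu
      obtain ⟨p, hp, rfl⟩ := List.mem_map.1 hu
      rw [String.toList_ofList]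
      exact pvSplit_clean word.toList p (by rw [hq]; simp [hp])
  have henc : pvEncode (String.ofList q, qs.map String.ofList) = word := by
    apply String.toList_inj.mp
    rw [pvEncode, PySem.Str.toList_join]
    have : (String.ofList q :: qs.map String.ofList).map String.toList = q :: qs := by
      simp [List.map_map, Function.comp_def]
    rw [show ("/" : String).toList = ['/'] from rfl, this, ← hq, pv_join_split]
  have hclean : ∀ st ∈ ([] : List (String × List String))
      ++ [(String.ofList q, qs.map String.ofList)], PvClean st := by
    intro st hst
    simp at hst
    rw [hst]
    exact hclean0
  obtain ⟨heq, hcl⟩ := pv_loop suffixes (suffixes.length + 2) []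
    [(String.ofList q, qs.map String.ofList)] hclean (by simp)
  have hof : (PySem.Set.ofList [word] : PySem.Set String) = [word] := rfl
  rw [cut_possible_suffixes, cut_possible_suffixes_alt, hof, hst0, hst2]
  have hof2 : (PySem.Set.ofList [((String.ofList q, qs.map String.ofList) : String × List String)])
      = [(String.ofList q, qs.map String.ofList)] := rfl
  rw [hof2]
  have hinit : ([word] : List String)
      = (([] : List (String × List String)) ++ [(String.ofList q, qs.map String.ofList)]).map pvEncode := by
    simp [henc]
  rw [hinit, heq, List.map_map]
  congr 1
  apply List.map_congr_left
  intro st hst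
  simp only [Function.comp_apply]
  rw [pv_decode st (by simpa using hcl st (by simpa using hst))]
  rfl

-- ===== VERDICT (by name: the statement is the Claim_ definition above) =====
theorem cut_possible_suffixes_spec : Claim_equal_cut_possible_suffixes := by
  intro word suffixes _
  unfold Spec_cut_possible_suffixes
  exact pv_final word suffixes
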